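-- pv_equiv track=rewrite | github.com/Spicify/audiomachine | parser/parser_core/emotion_tagger.py | _count_cues
-- ===== SOURCE A (Python) =====
-- from typing import Any, Dict, List, Optional, Tuple
--
-- def _count_cues(text: str, cues: Tuple[str, ...]) -> int:
--     if not text:
--         return 0
--     total = 0
--     for cue in cues:
--         if not cue:
--             continue
--         if cue in text:
--             total += 1
--     return total
-- ===== SOURCE B (Python) =====
-- def _count_cues(text, cues):
--     # Index all substrings of text at the cue lengths once, then test cues by hash lookup.
--     lengths = {len(cue) for cue in cues if cue}
--     subs = set()
--     n = len(text)
--     for L in lengths: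
--         for i in range(n - L + 1):
--             subs.add(text[i:i+L])
--     return sum(1 for cue in cues if cue in subs)
-- ===== Notes on version B (the rewrite author's own statement) =====
-- stated objective: faster
-- what changed: Instead of scanning the text once per cue, B builds a hash set of all substrings of text at the distinct cue lengths in one pass and then answers every cue by a set lookup.
import Mathlib
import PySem

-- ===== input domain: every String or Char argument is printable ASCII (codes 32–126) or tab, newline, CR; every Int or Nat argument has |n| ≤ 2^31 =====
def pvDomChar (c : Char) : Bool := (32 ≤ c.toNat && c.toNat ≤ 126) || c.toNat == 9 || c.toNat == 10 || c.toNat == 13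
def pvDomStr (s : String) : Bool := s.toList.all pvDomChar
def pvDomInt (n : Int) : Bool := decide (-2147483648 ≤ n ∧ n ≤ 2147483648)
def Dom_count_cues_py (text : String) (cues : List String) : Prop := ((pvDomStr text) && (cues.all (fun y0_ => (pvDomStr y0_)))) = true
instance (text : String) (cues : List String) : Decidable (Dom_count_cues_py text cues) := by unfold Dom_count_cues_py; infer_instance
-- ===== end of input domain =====

-- B replaces the per-cue scan of text with a substring index: it hashes every slice of
-- text at the (distinct) cue lengths into one set, then answers each cue by a set lookup.

-- ===== PORT A =====
def count_cues_py (text : String) (cues : List String) : Int :=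
  if text = "" then 0
  else
    cues.foldl
      (fun total cue =>
        if cue = "" then total
        else if PySem.Str.isIn cue text then total + 1 else total)
      0

-- ===== PORT B =====
def count_cues_py_alt (text : String) (cues : List String) : Int :=
  let lengths : PySem.Set Int :=
    cues.foldl (fun s cue => if cue = "" then s else PySem.Set.add s (PySem.Str.len cue))
      PySem.Set.empty
  let n : Int := PySem.Str.len text
  let subs : PySem.Set String :=
    lengths.foldl
      (fun acc L =>
        (PySem.List.pyRange 0 (n - L + 1) 1).foldl
          (fun acc2 i => PySem.Set.add acc2 (PySem.Str.slice text (some i) (some (i + L))))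
          acc)
      PySem.Set.empty
  (cues.map (fun cue => if PySem.Set.contains subs cue then (1 : Int) else 0)).sum

-- ===== PRECONDITION & SPEC =====
def Spec_count_cues_py (text : String) (cues : List String) (out : Int) : Prop := out = count_cues_py_alt text cues
instance (text : String) (cues : List String) (out : Int) : Decidable (Spec_count_cues_py text cues out) := by unfold Spec_count_cues_py; infer_instance

-- ===== CLAIM (what is proved, stated in full; the proofs are below) =====
def Claim_equal_count_cues_py : Prop := ∀ (text : String) (cues : List String), Dom_count_cues_py text cues → Spec_count_cues_py text cues (count_cues_py text cues)

-- ===== LEMMAS AND PROOFS =====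

-- membership in a foldl of Set.add
theorem pv_mem_foldl_add {α β : Type} [BEq α] [LawfulBEq α] (l : List β) (f : β → α)
    (s : PySem.Set α) (x : α) :
    x ∈ l.foldl (fun acc b => PySem.Set.add acc (f b)) s ↔ x ∈ s ∨ ∃ b ∈ l, f b = x := by
  induction l generalizing s with
  | nil => simp
  | cons b l ih =>
    simp only [List.foldl_cons, ih, PySem.Set.mem_add, List.mem_cons]
    constructor
    · rintro (⟨h | h⟩ | ⟨c, hc, hf⟩)
      · exact Or.inl h
      · exact Or.inr ⟨b, Or.inl rfl, h.symm⟩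
      · exact Or.inr ⟨c, Or.inr hc, hf⟩
    · rintro (h | ⟨c, (rfl | hc), hf⟩)
      · exact Or.inl (Or.inl h)
      · exact Or.inl (Or.inr hf.symm)
      · exact Or.inr ⟨c, hc, hf⟩

-- membership in the nested foldl of Set.add (B's subs index)
theorem pv_mem_foldl_foldl_add {α β γ : Type} [BEq α] [LawfulBEq α]
    (l : List β) (r : β → List γ) (f : β → γ → α) (s : PySem.Set α) (x : α) :
    x ∈ l.foldl (fun acc b => (r b).foldl (fun acc2 i => PySem.Set.add acc2 (f b i)) acc) s ↔
      x ∈ s ∨ ∃ b ∈ l, ∃ i ∈ r b, f b i = x := by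
  induction l generalizing s with
  | nil => simp
  | cons b l ih =>
    simp only [List.foldl_cons, ih, pv_mem_foldl_add, List.mem_cons]
    constructor
    · rintro (⟨h | ⟨i, hi, hf⟩⟩ | ⟨c, hc, hrest⟩)
      · exact Or.inl h
      · exact Or.inr ⟨b, Or.inl rfl, i, hi, hf⟩
      · exact Or.inr ⟨c, Or.inr hc, hrest⟩
    · rintro (h | ⟨c, (rfl | hc), hrest⟩)
      · exact Or.inl (Or.inl h)
      · exact Or.inl (Or.inr hrest)
      · exact Or.inr ⟨c, hc, hrest⟩

-- membership in B's lengths set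
theorem pv_mem_lengths (cues : List String) (s : PySem.Set Int) (L : Int) :
    L ∈ cues.foldl (fun s cue => if cue = "" then s else PySem.Set.add s (PySem.Str.len cue)) s ↔
      L ∈ s ∨ ∃ cue ∈ cues, cue ≠ "" ∧ PySem.Str.len cue = L := by
  induction cues generalizing s with
  | nil => simp
  | cons c cs ih =>
    by_cases hc : c = ""
    · simp only [List.foldl_cons, hc, ih, List.mem_cons]
      constructor
      · rintro (h | ⟨cue, h1, h2⟩)
        · exact Or.inl h
        · exact Or.inr ⟨cue, Or.inr h1, h2⟩
      · rintro (h | ⟨cue, (rfl | h1), h2, h3⟩)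
        · exact Or.inl h
        · exact absurd rfl h2
        · exact Or.inr ⟨cue, h1, h2, h3⟩
    · simp only [List.foldl_cons, if_neg hc, ih, PySem.Set.mem_add, List.mem_cons]
      constructor
      · rintro (⟨h | h⟩ | ⟨cue, h1, h2⟩)
        · exact Or.inl h
        · exact Or.inr ⟨c, Or.inl rfl, hc, h.symm⟩
        · exact Or.inr ⟨cue, Or.inr h1, h2⟩
      · rintro (h | ⟨cue, (rfl | h1), h2, h3⟩)
        · exact Or.inl (Or.inl h)
        · exact Or.inl (Or.inr h3.symm)
        · exact Or.inr ⟨cue, h1, h2, h3⟩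

-- a slice of length L at a valid position is a nonempty infix; an occurring nonempty cue is such a slice
theorem pv_toList_nil (s : String) : s.toList = [] ↔ s = "" := by
  rw [← String.toList_inj]; simp

theorem pv_index_hit (text : String) (cues : List String) (cue : String) (hcue : cue ∈ cues) :
    (∃ L, (∃ c ∈ cues, c ≠ "" ∧ PySem.Str.len c = L) ∧
       ∃ i ∈ PySem.List.pyRange 0 (PySem.Str.len text - L + 1) 1,
         PySem.Str.slice text (some i) (some (i + L)) = cue) ↔
      cue ≠ "" ∧ PySem.Str.isIn cue text = true := by
  constructor
  · rintro ⟨L, ⟨c, _, hc0, hcL⟩, i, hi, hslice⟩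
    rw [PySem.List.mem_pyRange_one] at hi
    obtain ⟨hi0, hiub⟩ := hi
    -- L is a positive length
    have hcl : c.toList.length ≠ 0 := by
      intro h0
      exact hc0 ((pv_toList_nil c).mp (List.length_eq_zero_iff.mp h0))
    have hLpos : 0 < L := by
      rw [PySem.Str.len_eq] at hcL; omega
    -- the slice, at list level
    have hlist : cue.toList = ((text.toList.drop i.toNat).take L.toNat) := by
      have := congrArg String.toList hslice
      rw [PySem.Str.toList_slice, PySem.Chars.slice_eq_listSlice] at this
      rw [PySem.List.slice_toNat _ hi0 (by omega)] at this
      have hEq : (i + L).toNat - i.toNat = L.toNat := by omega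
      rw [hEq] at this
      exact this.symm
    have hiLn : i.toNat + L.toNat ≤ text.toList.length := by
      rw [PySem.Str.len_eq] at hiub; omega
    have hlen : cue.toList.length = L.toNat := by
      rw [hlist, List.length_take, List.length_drop]; omega
    refine ⟨?_, ?_⟩
    · intro h0
      rw [← pv_toList_nil, List.eq_nil_iff_length_eq_zero] at h0
      omega
    · rw [PySem.Str.isIn_iff_infix, hlist]
      exact ((text.toList.drop i.toNat).take_prefix L.toNat).isInfix.trans
        (text.toList.drop_suffix i.toNat).isInfix
  · rintro ⟨h0, hin⟩
    rw [PySem.Str.isIn_iff_infix] at hin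
    obtain ⟨pre, suf, hsplit⟩ := hin
    have hpos : 0 < cue.toList.length := by
      rcases Nat.eq_zero_or_pos cue.toList.length with h | h
      · exact absurd ((pv_toList_nil cue).mp (List.length_eq_zero_iff.mp h)) h0
      · exact h
    have hlenle : pre.length + cue.toList.length ≤ text.toList.length := by
      have := congrArg List.length hsplit
      simp only [List.length_append] at this
      omega
    refine ⟨PySem.Str.len cue, ⟨cue, hcue, h0, rfl⟩, (pre.length : Int), ?_, ?_⟩
    · rw [PySem.List.mem_pyRange_one, PySem.Str.len_eq, PySem.Str.len_eq]
      refine ⟨Int.natCast_nonneg _, by omega⟩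
    · rw [← String.toList_inj, PySem.Str.toList_slice, PySem.Chars.slice_eq_listSlice,
          PySem.Str.len_eq, PySem.List.slice_natCast_add, ← hsplit]
      simp

-- ===== VERDICT (by name: the statement is the Claim_ definition above) =====
theorem count_cues_py_spec : Claim_equal_count_cues_py := by
  intro text cues _
  unfold Spec_count_cues_py count_cues_py count_cues_py_alt
  -- fold A into a countP
  have hA : ∀ t : String,
      List.foldl (fun total cue => if cue = "" then total
        else if PySem.Str.isIn cue t then total + 1 else total) 0 cues
        = (List.countP (fun cue => !(cue == "") && PySem.Str.isIn cue t) cues : Int) := by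
    intro t
    have hfun : (fun (total : Int) cue => if cue = "" then total
        else if PySem.Str.isIn cue t then total + 1 else total)
        = (fun total cue => if (!(cue == "") && PySem.Str.isIn cue t) then total + 1 else total) := by
      funext total cue
      by_cases h : cue = "" <;> simp [h]
    rw [hfun, PySem.List.foldl_count_if]
    simp
  rw [PySem.List.sum_map_ite_one_zero]
  -- the B-side predicate agrees with A's on every cue of the list
  have hcongr : List.countP (fun cue => PySem.Set.contains
      (List.foldl
        (fun acc L => (PySem.List.pyRange 0 (PySem.Str.len text - L + 1) 1).foldl
          (fun acc2 i => PySem.Set.add acc2 (PySem.Str.slice text (some i) (some (i + L)))) acc)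
        PySem.Set.empty
        (cues.foldl (fun s cue => if cue = "" then s else PySem.Set.add s (PySem.Str.len cue))
          PySem.Set.empty)) cue) cues
      = List.countP (fun cue => !(cue == "") && PySem.Str.isIn cue text) cues := by
    apply List.countP_congr
    intro cue hcue
    rw [PySem.Set.contains_iff, pv_mem_foldl_foldl_add]
    have hempty : cue ∉ (PySem.Set.empty : PySem.Set String) := by simp [PySem.Set.empty]
    constructor
    · rintro (h | ⟨L, hL, i, hi, hf⟩)
      · exact absurd h hempty
      · rw [pv_mem_lengths] at hL
        rcases hL with h | hL
        · simp [PySem.Set.empty] at h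
        · have := (pv_index_hit text cues cue hcue).mp ⟨L, hL, i, hi, hf⟩
          have h2 : PySem.Chars.isIn cue.toList text.toList = true := by simpa using this.2
          simp [this.1, h2]
    · intro h
      simp only [Bool.and_eq_true, Bool.not_eq_eq_eq_not, Bool.not_true, beq_eq_false_iff_ne,
        ne_eq] at h
      obtain ⟨L, hL, i, hi, hf⟩ := (pv_index_hit text cues cue hcue).mpr ⟨h.1, h.2⟩
      exact Or.inr ⟨L, by rw [pv_mem_lengths]; exact Or.inr hL, i, hi, hf⟩
  by_cases ht : text = ""
  · -- A returns 0; B's index is empty too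
    rw [if_pos ht, hcongr, ht]
    have : List.countP (fun cue => !(cue == "") && PySem.Str.isIn cue "") cues = 0 := by
      rw [List.countP_eq_zero]
      intro cue _
      simp only [Bool.and_eq_true, not_and, Bool.not_eq_eq_eq_not, Bool.not_true,
        beq_eq_false_iff_ne, ne_eq]
      intro hne hin
      have hinf : cue.toList <:+: ([] : List Char) := by
        simpa [PySem.Chars.isIn_iff_infix] using hin
      exact hne ((pv_toList_nil cue).mp (List.eq_nil_of_infix_nil hinf))
    rw [this]; simp
  · rw [if_neg ht, hA, hcongr]
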